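-- pv_equiv track=rewrite | github.com/Khubaib14/Leetcode | Intersection of two arrays - GFG/intersection-of-two-arrays.py | solOne
-- ===== SOURCE A (Python) =====
-- def solOne(a, b, n, m):
--     if len(b) < len(a):
--         lower = b
--         upper = a
--     else:
--         lower = a
--         upper = b
--
--     d = {}
--
--     for i in lower:
--         d[i] = d.get(i, 0) + 1
--
--     count = 0
--     upper = set(upper)
--     for i in upper:
--         if i in d:
--             count += 1
--     return (count)
-- ===== SOURCE B (Python) =====
-- def solOne(a, b, n, m):
--     xs = sorted(set(a))
--     ys = sorted(set(b))
--     i = j = count = 0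
--     while i < len(xs) and j < len(ys):
--         if xs[i] == ys[j]:
--             count += 1
--             i += 1
--             j += 1
--         elif xs[i] < ys[j]:
--             i += 1
--         else:
--             j += 1
--     return count
-- ===== Notes on version B (the rewrite author's own statement) =====
-- stated objective: alternative
-- what changed: Replaces the size-based branch + frequency dict + hash-set membership count with sorting the deduplicated arrays and a two-pointer merge walk that counts equal elements.
import Mathlib
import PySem

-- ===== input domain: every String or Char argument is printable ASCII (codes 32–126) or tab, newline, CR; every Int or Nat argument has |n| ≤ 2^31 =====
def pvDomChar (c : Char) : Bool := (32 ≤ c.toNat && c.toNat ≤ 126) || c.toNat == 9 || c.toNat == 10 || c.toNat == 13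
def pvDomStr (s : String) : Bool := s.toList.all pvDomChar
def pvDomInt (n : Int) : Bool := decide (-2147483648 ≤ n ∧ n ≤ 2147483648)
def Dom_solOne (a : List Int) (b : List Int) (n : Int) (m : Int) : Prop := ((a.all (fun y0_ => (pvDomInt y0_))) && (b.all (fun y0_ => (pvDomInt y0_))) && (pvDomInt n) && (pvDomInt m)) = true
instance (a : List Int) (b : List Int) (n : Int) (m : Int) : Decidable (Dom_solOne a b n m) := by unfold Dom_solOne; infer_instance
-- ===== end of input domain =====

-- B counts the distinct common elements by a two-pointer merge walk over the sorted deduplicated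
-- arrays, instead of A's size-based branch + frequency dict + membership count over a hash set.

-- ===== PORT A =====
def solOne (a : List Int) (b : List Int) (n : Int) (m : Int) : Int :=
  let lu : List Int × List Int := if b.length < a.length then (b, a) else (a, b)
  let lower := lu.1
  let upper := lu.2
  let d : PySem.Dict Int Int := lower.foldl (fun d i => d.insert i (d.getD i 0 + 1)) PySem.Dict.empty
  let upperSet : PySem.Set Int := PySem.Set.ofList upper
  upperSet.foldl (fun count i => if d.contains i then count + 1 else count) (0 : Int)

-- ===== PORT B =====
-- Source B's while loop over indices i, j, transcribed as structural recursion on the two suffixes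
def mergeCount : List Int → List Int → Int
  | [], _ => 0
  | _ :: _, [] => 0
  | x :: xs, y :: ys =>
    if x = y then 1 + mergeCount xs ys
    else if x < y then mergeCount xs (y :: ys)
    else mergeCount (x :: xs) ys
termination_by xs ys => xs.length + ys.length
decreasing_by all_goals (simp only [List.length_cons]; omega)

def solOne_alt (a : List Int) (b : List Int) (n : Int) (m : Int) : Int :=
  let xs := PySem.List.sorted (PySem.Set.ofList a) (fun x => x) false
  let ys := PySem.List.sorted (PySem.Set.ofList b) (fun x => x) false
  mergeCount xs ys

-- ===== PRECONDITION & SPEC =====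
def Spec_solOne (a : List Int) (b : List Int) (n : Int) (m : Int) (out : Int) : Prop := out = solOne_alt a b n m
instance (a : List Int) (b : List Int) (n : Int) (m : Int) (out : Int) : Decidable (Spec_solOne a b n m out) := by unfold Spec_solOne; infer_instance

-- ===== CLAIM (what is proved, stated in full; the proofs are below) =====
def Claim_equal_solOne : Prop := ∀ (a : List Int) (b : List Int) (n : Int) (m : Int), Dom_solOne a b n m → Spec_solOne a b n m (solOne a b n m)

-- ===== LEMMAS AND PROOFS =====

-- B's side: the merge walk on two strictly increasing lists counts their common elements
lemma mergeCount_eq_card (xs ys : List Int) (hx : xs.Pairwise (· < ·)) (hy : ys.Pairwise (· < ·)) :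
    mergeCount xs ys = ((xs.toFinset ∩ ys.toFinset).card : Int) := by
  fun_induction mergeCount xs ys with
  | case1 ys => simp
  | case2 x xs => simp
  | case3 xs b ys ih =>
    have hba : b ∉ xs := fun h => absurd (List.rel_of_pairwise_cons hx h) (lt_irrefl b)
    have hbc : b ∉ ys := fun h => absurd (List.rel_of_pairwise_cons hy h) (lt_irrefl b)
    rw [List.toFinset_cons, List.toFinset_cons, ← Finset.insert_inter_distrib,
      Finset.card_insert_of_notMem (by simp [hba, hbc]),
      ih hx.of_cons hy.of_cons]
    push_cast; ring
  | case4 a xs c ys hne hlt ih =>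
    have hm : a ∉ (c :: ys).toFinset := by
      simp only [List.mem_toFinset, List.mem_cons]
      rintro (rfl | h)
      · exact hne rfl
      · exact absurd (lt_trans hlt (List.rel_of_pairwise_cons hy h)) (lt_irrefl a)
    rw [List.toFinset_cons, Finset.insert_inter_of_notMem hm, ih hx.of_cons hy]
  | case5 a xs c ys hne hge ih =>
    have hca : c < a := by omega
    have hm : c ∉ (a :: xs).toFinset := by
      simp only [List.mem_toFinset, List.mem_cons]
      rintro (rfl | h)
      · exact hne rfl
      · exact absurd (lt_trans hca (List.rel_of_pairwise_cons hx h)) (lt_irrefl c)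
    rw [show ((c :: ys).toFinset : Finset Int) = insert c ys.toFinset from List.toFinset_cons,
      Finset.inter_insert_of_notMem hm, ih hx hy.of_cons]

-- A's side: counting the elements of set(upper) that lie in lower is the intersection cardinality
lemma countP_mem_eq_card (u l : List Int) :
    (PySem.Set.ofList u).countP (fun x => decide (x ∈ l)) = (u.toFinset ∩ l.toFinset).card := by
  rw [List.countP_eq_length_filter]
  have hnd : ((PySem.Set.ofList u).filter (fun x => decide (x ∈ l))).Nodup :=
    (PySem.Set.nodup_ofList u).filter _
  rw [← List.toFinset_card_of_nodup hnd]
  congr 1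
  ext z
  simp [PySem.Set.mem_ofList]

lemma foldl_contains_counter_eq_card (l u : List Int) :
    (PySem.Set.ofList u).foldl
      (fun count i =>
        if (l.foldl (fun d i => d.insert i (d.getD i 0 + 1))
              (PySem.Dict.empty : PySem.Dict Int Int)).contains i
        then count + 1 else count) (0 : Int)
      = ((u.toFinset ∩ l.toFinset).card : Int) := by
  rw [PySem.Dict.foldl_insert_getD_add_one_eq_counter]
  simp only [PySem.Dict.contains_counter]
  rw [PySem.List.foldl_count_if (fun i => l.contains i) (PySem.Set.ofList u) 0]
  simp only [List.contains_eq_mem]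
  rw [countP_mem_eq_card]
  ring

lemma solOne_eq_card (a b : List Int) (n m : Int) :
    solOne a b n m = ((a.toFinset ∩ b.toFinset).card : Int) := by
  by_cases h : b.length < a.length
  · simp only [solOne, if_pos h]
    rw [foldl_contains_counter_eq_card]
  · simp only [solOne, if_neg h]
    rw [foldl_contains_counter_eq_card, Finset.inter_comm]

lemma solOne_alt_eq_card (a b : List Int) (n m : Int) :
    solOne_alt a b n m = ((a.toFinset ∩ b.toFinset).card : Int) := by
  unfold solOne_alt
  have ha := PySem.List.sorted_ofList_pairwise_lt a
  have hb := PySem.List.sorted_ofList_pairwise_lt b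
  have e : ∀ u : List Int,
      (PySem.List.sorted (PySem.Set.ofList u) (fun x => x) false).toFinset = u.toFinset := by
    intro u
    rw [List.toFinset_eq_of_perm _ _ (PySem.List.sorted_perm _ _ _)]
    ext z
    simp [PySem.Set.mem_ofList]
  rw [mergeCount_eq_card _ _ ha hb, e, e]

-- ===== VERDICT (by name: the statement is the Claim_ definition above) =====
theorem solOne_spec : Claim_equal_solOne := by
  intro a b n m _
  unfold Spec_solOne
  rw [solOne_eq_card, solOne_alt_eq_card]
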